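-- pv_equiv track=rewrite | github.com/jenni4j/algo-practice | interview_prep/colored_balls.py | organizingContainers
-- ===== SOURCE A (Python) =====
-- from typing import List
--
-- def organizingContainers(container: List[int]) -> str:
--     container_capacity = []
--     color_totals = [0] * len(container[0])
--
--     for c in container:
--         capacity = sum(c)
--         container_capacity.append(capacity)
--         for i in range(len(container[0])):
--             color_totals[i] += c[i]
--
--     container_capacity.sort()
--     color_totals.sort()
--
--     if container_capacity == color_totals:
--         return 'Possible'
--     else:
--         return 'Impossible'
-- ===== SOURCE B (Python) =====
-- from typing import List
--
-- def organizingContainers(container: List[int]) -> str: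
--     # greedy matching: cross each row capacity off the pool of column totals
--     remaining = [sum(col) for col in zip(*container)]
--     for row in container:
--         try:
--             remaining.remove(sum(row))
--         except ValueError:
--             return 'Impossible'
--     return 'Possible' if not remaining else 'Impossible'
-- ===== Notes on version B (the rewrite author's own statement) =====
-- stated objective: alternative
-- what changed: B drops A's preallocated index-mutating accumulator and the sort-both-then-compare test entirely: it builds the pool of column totals by zip-transposing once and then greedily matches each row sum against that pool with list.remove, declaring Impossible on the first unmatched row sum or leftover column total; no sorting happens.
import Mathlib
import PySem

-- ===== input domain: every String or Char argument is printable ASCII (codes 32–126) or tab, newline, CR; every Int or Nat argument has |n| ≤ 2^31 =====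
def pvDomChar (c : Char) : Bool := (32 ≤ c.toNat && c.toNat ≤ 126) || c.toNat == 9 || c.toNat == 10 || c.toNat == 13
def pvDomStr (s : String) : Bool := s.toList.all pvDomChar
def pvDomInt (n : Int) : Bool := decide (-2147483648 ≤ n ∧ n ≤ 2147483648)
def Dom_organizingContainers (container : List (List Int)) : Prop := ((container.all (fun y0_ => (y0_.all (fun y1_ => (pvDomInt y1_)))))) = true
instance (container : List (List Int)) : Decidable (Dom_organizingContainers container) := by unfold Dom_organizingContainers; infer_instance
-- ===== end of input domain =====

-- B replaces A's accumulate-then-sort-and-compare with a greedy matching loop: each row sum is crossed off the pool of column totals (list.remove); objective: alternative.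


-- ===== PORT A =====
-- literal port of A: accumulate capacities and per-index color totals in one pass, then sort both and compare
def organizingContainers (container : List (List Int)) : String :=
  let n : Nat := (container.headD []).length        -- len(container[0]); Pre_ excludes the empty input where Python raises
  let st := container.foldl
    (fun (st : List Int × List Int) c =>
      let capacity := c.sum
      ( st.1 ++ [capacity],
        (PySem.List.pyRange 0 (n : Int) 1).foldl
          (fun tot i => PySem.List.pySetD tot i (PySem.List.pyGetD tot i 0 + PySem.List.pyGetD c i 0)) st.2 ))
    ([], List.replicate n 0)
  if PySem.List.sorted st.1 (fun x => x) false = PySem.List.sorted st.2 (fun x => x) false then "Possible"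
  else "Impossible"

-- ===== PORT B =====
-- zip(*container): rows truncated to the shortest, column tuples in order
def pyZipCols (rows : List (List Int)) : List (List Int) :=
  if rows.isEmpty ∨ rows.any (·.isEmpty) then []
  else (rows.map (·.headD 0)) :: pyZipCols (rows.map (·.tail))
termination_by (rows.headD []).length
decreasing_by
  cases rows with
  | nil => simp_all
  | cons h t =>
    simp only [List.isEmpty_iff, List.any_eq_true, not_or] at *
    cases h with
    | nil => simp_all
    | cons a as => simp

-- B's for-loop: remaining.remove(sum(row)) per row, 'Impossible' on ValueError,
-- 'Possible' at the end iff the pool is exhausted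
def pvMatchLoop (rows : List (List Int)) (remaining : List Int) : String :=
  match rows with
  | [] => if remaining.isEmpty then "Possible" else "Impossible"
  | row :: rest =>
    match PySem.List.remove? remaining row.sum with
    | none => "Impossible"
    | some r => pvMatchLoop rest r

def organizingContainers_alt (container : List (List Int)) : String :=
  let remaining := (pyZipCols container).map (·.sum)
  pvMatchLoop container remaining

-- ===== PRECONDITION & SPEC =====
-- Pre_ excludes exactly the inputs where A raises IndexError: the empty container (container[0])
-- and ragged inputs where some row is shorter than row 0 (c[i] out of range in the inner loop).
def Pre_organizingContainers (container : List (List Int)) : Prop :=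
  container ≠ [] ∧ ∀ c ∈ container, (container.headD []).length ≤ c.length
instance (container : List (List Int)) : Decidable (Pre_organizingContainers container) := by
  unfold Pre_organizingContainers; infer_instance

def pvWitness_organizingContainers : List (List Int) := [[1, 2], [3, 0]]

def Spec_organizingContainers (container : List (List Int)) (out : String) : Prop := out = organizingContainers_alt container
instance (container : List (List Int)) (out : String) : Decidable (Spec_organizingContainers container out) := by unfold Spec_organizingContainers; infer_instance

-- ===== CLAIM (what is proved, stated in full; the proofs are below) =====
def Claim_equal_organizingContainers : Prop := ∀ (container : List (List Int)), Dom_organizingContainers container → Pre_organizingContainers container → Spec_organizingContainers container (organizingContainers container)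

-- ===== LEMMAS AND PROOFS =====

-- the list both sides compute for column j totals
def pvColFn (rows : List (List Int)) (j : Nat) : Int := (rows.map (fun c => c.getD j 0)).sum

-- A's inner loop over range n, in Nat form
lemma innerFold_range (c tot : List Int) (n : Nat) (h : n ≤ tot.length) :
    (List.range n).foldl (fun t k => t.set k (t.getD k 0 + c.getD k 0)) tot
      = ((List.range n).map (fun j => tot.getD j 0 + c.getD j 0)) ++ tot.drop n := by
  induction n with
  | zero => simp
  | succ m ih =>
    rw [List.range_succ, List.foldl_append, ih (by omega)]
    simp only [List.foldl_cons, List.foldl_nil]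
    have hlen : ((List.range m).map (fun j => tot.getD j 0 + c.getD j 0)).length = m := by simp
    have hget : ((List.range m).map (fun j => tot.getD j 0 + c.getD j 0) ++ tot.drop m).getD m 0
        = tot.getD m 0 := by
      simp [List.getD, List.getElem?_append_right, List.getElem?_drop]
    rw [hget]
    have hdrop : tot.drop m = tot[m] :: tot.drop (m + 1) := List.drop_eq_getElem_cons (by omega)
    rw [List.set_append_right _ _ (by omega), hlen]
    rw [hdrop]
    simp [List.append_assoc]
    rw [hdrop, List.set_cons_zero]


-- A's inner loop (pyRange form) equals the Nat-range fold
lemma innerFold_py (c tot : List Int) (n : Nat) :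
    (PySem.List.pyRange 0 (n : Int) 1).foldl
        (fun t i => PySem.List.pySetD t i (PySem.List.pyGetD t i 0 + PySem.List.pyGetD c i 0)) tot
      = (List.range n).foldl (fun t k => t.set k (t.getD k 0 + c.getD k 0)) tot := by
  rw [PySem.List.pyRange_one, List.foldl_map]
  simp

-- A's outer fold: capacities and pointwise column totals
lemma outerFold (rows : List (List Int)) (n : Nat) (acc tot : List Int) (h : tot.length = n) :
    (rows.foldl
      (fun (st : List Int × List Int) c =>
        ( st.1 ++ [c.sum],
          (PySem.List.pyRange 0 (n : Int) 1).foldl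
            (fun t i => PySem.List.pySetD t i (PySem.List.pyGetD t i 0 + PySem.List.pyGetD c i 0)) st.2 ))
      (acc, tot)).1 = acc ++ rows.map (·.sum)
    ∧ (rows.foldl
      (fun (st : List Int × List Int) c =>
        ( st.1 ++ [c.sum],
          (PySem.List.pyRange 0 (n : Int) 1).foldl
            (fun t i => PySem.List.pySetD t i (PySem.List.pyGetD t i 0 + PySem.List.pyGetD c i 0)) st.2 ))
      (acc, tot)).2 = (List.range n).map (fun j => tot.getD j 0 + pvColFn rows j) := by
  induction rows generalizing acc tot with
  | nil =>
    refine ⟨by simp, ?_⟩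
    simp only [List.foldl_nil, pvColFn, List.map_nil, List.sum_nil, add_zero]
    apply List.ext_getElem (by simp [h])
    intro i h1 h2
    simp only [List.getElem_map, List.getElem_range]
    rw [List.getD_eq_getElem _ _ (by omega)]
  | cons c rs ih =>
    simp only [List.foldl_cons]
    rw [innerFold_py, innerFold_range c tot n (by omega)]
    rw [List.drop_of_length_le (by omega), List.append_nil]
    have hlen : ((List.range n).map (fun j => tot.getD j 0 + c.getD j 0)).length = n := by simp
    obtain ⟨h1, h2⟩ := ih (acc ++ [c.sum]) _ hlen
    refine ⟨by rw [h1]; simp, ?_⟩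
    rw [h2]
    apply List.map_congr_left
    intro j hj
    rw [List.mem_range] at hj
    rw [PySem.List.getD_map_range _ _ _ _ ]
    · simp only [pvColFn, List.map_cons, List.sum_cons]; ring
    · exact hj

-- B's transpose under Pre_: columns 0..n-1, n = length of the first row
lemma pyZipCols_eq (n : Nat) (rows : List (List Int)) (hne : rows ≠ [])
    (hhd : (rows.headD []).length = n) (hall : ∀ c ∈ rows, n ≤ c.length) :
    pyZipCols rows = (List.range n).map (fun j => rows.map (fun c => c.getD j 0)) := by
  induction n generalizing rows with
  | zero =>
    rw [pyZipCols]
    have : (rows.headD []).isEmpty := by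
      cases rows with
      | nil => simp
      | cons a t => simpa using List.length_eq_zero_iff.mp (by simpa using hhd)
    have hmem : (rows.headD []) ∈ rows := by
      cases rows with
      | nil => exact absurd rfl hne
      | cons a t => simp
    rw [if_pos (Or.inr (List.any_eq_true.mpr ⟨_, hmem, this⟩))]
    simp
  | succ m ih =>
    have hnoempty : ∀ c ∈ rows, c ≠ [] := by
      intro c hc hcnil
      have := hall c hc
      simp [hcnil] at this
    rw [pyZipCols, if_neg]
    · have htne : rows.map (·.tail) ≠ [] := by simpa using hne
      have hthd : ((rows.map (·.tail)).headD []).length = m := by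
        cases rows with
        | nil => exact absurd rfl hne
        | cons a t =>
          simp only [List.map_cons, List.headD_cons] at *
          simp [List.length_tail, hhd]
      have htall : ∀ c ∈ rows.map (·.tail), m ≤ c.length := by
        intro c hc
        obtain ⟨d, hd, rfl⟩ := List.mem_map.mp hc
        have := hall d hd
        simp [List.length_tail]
        omega
      rw [ih _ htne hthd htall]
      rw [List.range_succ_eq_map, List.map_cons, List.map_map]
      congr 1
      · apply List.map_congr_left
        intro c hc
        cases c with
        | nil => exact absurd rfl (hnoempty _ hc)
        | cons x xs => simp
      · apply List.map_congr_left
        intro j _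
        simp only [Function.comp, List.map_map]
        apply List.map_congr_left
        intro c hc
        cases c with
        | nil => exact absurd rfl (hnoempty _ hc)
        | cons x xs => simp
    · simp only [not_or, List.isEmpty_iff, List.any_eq_true, not_exists, not_and]
      exact ⟨hne, fun c hc => by simpa using hnoempty c hc⟩

-- sorted-equality is multiset equality
lemma sorted_iff_multiset (xs ys : List Int) :
    (PySem.List.sorted xs (fun x => x) false = PySem.List.sorted ys (fun x => x) false)
      ↔ ((xs : Multiset Int) = (ys : Multiset Int)) := by
  rw [PySem.List.sorted_id_eq_sorted_id_iff_perm, Multiset.coe_eq_coe]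

-- B's greedy removal loop decides multiset equality of the row sums against the pool
lemma matchLoop_eq (rows : List (List Int)) (rem : List Int) :
    pvMatchLoop rows rem
      = if ((rows.map (·.sum) : List Int) : Multiset Int) = (rem : Multiset Int)
        then "Possible" else "Impossible" := by
  induction rows generalizing rem with
  | nil =>
    simp only [pvMatchLoop, List.map_nil]
    by_cases h : rem = []
    · subst h; simp
    · rw [if_neg (by simpa using h), if_neg]
      simpa [eq_comm, Multiset.coe_eq_zero] using h
  | cons row rest ih =>
    simp only [pvMatchLoop, List.map_cons]
    by_cases hmem : row.sum ∈ rem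
    · rw [PySem.List.remove?_eq_some_erase _ _ hmem]
      simp only []
      rw [ih]
      have hco : ((rem.erase row.sum : List Int) : Multiset Int)
          = (rem : Multiset Int).erase row.sum := by
        simp [Multiset.coe_erase]
      by_cases h : ((rest.map (·.sum) : List Int) : Multiset Int) = ((rem.erase row.sum : List Int) : Multiset Int)
      · rw [if_pos h, if_pos]
        rw [← Multiset.cons_coe, h, hco, Multiset.cons_erase (by simpa using hmem)]
      · rw [if_neg h, if_neg]
        intro hc
        apply h
        rw [hco]
        rw [← Multiset.cons_coe] at hc
        rw [← hc, Multiset.erase_cons_head]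
    · rw [(PySem.List.remove?_eq_none_iff _ _).mpr hmem, if_neg]
      intro hc
      apply hmem
      have : row.sum ∈ ((row.sum ::ₘ (rest.map (·.sum) : Multiset Int))) := Multiset.mem_cons_self _ _
      rw [← Multiset.cons_coe] at hc
      rw [hc] at this
      simpa using this

-- ===== VERDICT (by name: the statement is the Claim_ definition above) =====
theorem organizingContainers_spec : Claim_equal_organizingContainers := by
  intro container _ hpre
  obtain ⟨hne, hall⟩ := hpre
  unfold Spec_organizingContainers organizingContainers organizingContainers_alt
  simp only []
  obtain ⟨h1, h2⟩ := outerFold container ((container.headD []).length) []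
      (List.replicate ((container.headD []).length) 0) (by simp)
  rw [h1, h2, pyZipCols_eq ((container.headD []).length) container hne rfl hall]
  have hcols : (List.range ((container.headD []).length)).map
        (fun j => (List.replicate ((container.headD []).length) (0:Int)).getD j 0 + pvColFn container j)
      = ((List.range ((container.headD []).length)).map
        (fun j => container.map (fun c => c.getD j 0))).map (·.sum) := by
    rw [List.map_map]
    apply List.map_congr_left
    intro j hj
    rw [List.mem_range] at hj
    rw [List.getD_eq_getElem _ _ (by simpa using hj)]
    simp [pvColFn]
  rw [hcols, List.nil_append, matchLoop_eq]
  simp only [sorted_iff_multiset]
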